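-- pv_equiv track=rewrite | github.com/Hussain0327/Research-agent | newsletter/pipeline.py | _extract_tickers_from_topic
-- ===== SOURCE A (Python) =====
-- from typing import List, Dict, Tuple
--
-- def _extract_tickers_from_topic(topic: str) -> List[str]:
--     """Extract relevant tickers based on newsletter topic keywords."""
--     topic_lower = topic.lower()
--     tickers = ["^VIX"]  # Always include VIX volatility
--
--     # Topic-aware ticker mapping
--     if any(word in topic_lower for word in ["crypto", "bitcoin", "btc", "ethereum", "eth", "blockchain"]):
--         tickers.extend(["BTC-USD", "ETH-USD"])
--     elif any(word in topic_lower for word in ["bond", "treasury", "fixed income", "rates"]):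
--         tickers.extend(["TLT", "IEF"])  # Long-term and intermediate treasuries
--     elif any(word in topic_lower for word in ["tech", "technology", "ai", "software"]):
--         tickers.extend(["QQQ", "^IXIC"])  # Nasdaq
--     elif any(word in topic_lower for word in ["energy", "oil", "commodit"]):
--         tickers.extend(["XLE", "USO"])  # Energy sector
--     else:
--         # Default: broad market indices
--         tickers.extend(["SPY", "^GSPC"])
--
--     return tickers
-- ===== SOURCE B (Python) =====
-- from typing import List
--
-- # keyword -> category index; categories 0..3 in A's branch order, 4 = default
-- _KW_CAT = {
--     "crypto": 0, "bitcoin": 0, "btc": 0, "ethereum": 0, "eth": 0, "blockchain": 0,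
--     "bond": 1, "treasury": 1, "fixed income": 1, "rates": 1,
--     "tech": 2, "technology": 2, "ai": 2, "software": 2,
--     "energy": 3, "oil": 3, "commodit": 3,
-- }
-- _CAT_TICKERS = [["BTC-USD", "ETH-USD"], ["TLT", "IEF"], ["QQQ", "^IXIC"],
--                 ["XLE", "USO"], ["SPY", "^GSPC"]]
--
-- def _extract_tickers_from_topic(topic: str) -> List[str]:
--     """Single positional scan over the topic: at each position, see which
--     keywords start there and keep the smallest (highest-priority) category."""
--     t = topic.lower()
--     best = 4
--     for i in range(len(t)):
--         for kw, cat in _KW_CAT.items():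
--             if cat < best and t.startswith(kw, i):
--                 best = cat
--     return ["^VIX"] + _CAT_TICKERS[best]
-- ===== Notes on version B (the rewrite author's own statement) =====
-- stated objective: alternative
-- what changed: Instead of four ordered any-substring tests, B makes a single positional scan over the topic string, testing at each index which keywords start there via a keyword-to-category map and keeping the minimum category index, then looks the tickers up in a table.
import Mathlib
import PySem

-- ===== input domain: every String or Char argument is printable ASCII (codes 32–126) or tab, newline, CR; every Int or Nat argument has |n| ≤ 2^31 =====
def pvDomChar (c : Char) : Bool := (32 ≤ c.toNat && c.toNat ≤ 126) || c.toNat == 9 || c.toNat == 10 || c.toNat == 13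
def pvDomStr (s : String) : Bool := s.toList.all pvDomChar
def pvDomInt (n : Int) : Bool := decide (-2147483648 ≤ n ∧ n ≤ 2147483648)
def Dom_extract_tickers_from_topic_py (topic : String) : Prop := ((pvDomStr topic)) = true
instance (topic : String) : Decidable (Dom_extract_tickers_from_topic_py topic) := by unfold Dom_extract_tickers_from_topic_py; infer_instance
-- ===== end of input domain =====

-- B replaces A's four ordered any-substring tests by a single positional scan over the topic keeping the minimum-priority matched category (then a table lookup); same return values.


-- ===== PORT A =====
def extract_tickers_from_topic_py (topic : String) : List String :=
  let topic_lower := PySem.Str.lower topic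
  let tickers : List String := ["^VIX"]
  if ["crypto", "bitcoin", "btc", "ethereum", "eth", "blockchain"].any (fun word => PySem.Str.isIn word topic_lower) then
    tickers ++ ["BTC-USD", "ETH-USD"]
  else if ["bond", "treasury", "fixed income", "rates"].any (fun word => PySem.Str.isIn word topic_lower) then
    tickers ++ ["TLT", "IEF"]
  else if ["tech", "technology", "ai", "software"].any (fun word => PySem.Str.isIn word topic_lower) then
    tickers ++ ["QQQ", "^IXIC"]
  else if ["energy", "oil", "commodit"].any (fun word => PySem.Str.isIn word topic_lower) then
    tickers ++ ["XLE", "USO"]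
  else
    tickers ++ ["SPY", "^GSPC"]

-- ===== PORT B =====
-- keyword -> category index; categories 0..3 in priority order, 4 = default
def pvKwCat : List (List Char × Nat) :=
  [ ("crypto".toList, 0), ("bitcoin".toList, 0), ("btc".toList, 0),
    ("ethereum".toList, 0), ("eth".toList, 0), ("blockchain".toList, 0),
    ("bond".toList, 1), ("treasury".toList, 1), ("fixed income".toList, 1), ("rates".toList, 1),
    ("tech".toList, 2), ("technology".toList, 2), ("ai".toList, 2), ("software".toList, 2),
    ("energy".toList, 3), ("oil".toList, 3), ("commodit".toList, 3) ]

def pvCatTickers : List (List String) :=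
  [ ["BTC-USD", "ETH-USD"], ["TLT", "IEF"], ["QQQ", "^IXIC"], ["XLE", "USO"], ["SPY", "^GSPC"] ]

-- B: one positional scan; at each index i, any keyword starting there may lower `best`.
-- t.startswith(kw, i) is ported as PySem.Chars.startswith (t.drop i) kw (exact: offset startswith).
-- _CAT_TICKERS[best] is ported as getD (exact: best ≤ 4 always, so the index is in range).
def extract_tickers_from_topic_py_alt (topic : String) : List String :=
  let t := (PySem.Str.lower topic).toList
  let best := (List.range t.length).foldl (fun best i =>
      pvKwCat.foldl (fun best kc =>
        if kc.2 < best ∧ PySem.Chars.startswith (t.drop i) kc.1 then kc.2 else best) best) 4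
  ["^VIX"] ++ pvCatTickers.getD best []

-- ===== PRECONDITION & SPEC =====
def Spec_extract_tickers_from_topic_py (topic : String) (out : List String) : Prop := out = extract_tickers_from_topic_py_alt topic
instance (topic : String) (out : List String) : Decidable (Spec_extract_tickers_from_topic_py topic out) := by unfold Spec_extract_tickers_from_topic_py; infer_instance

-- ===== CLAIM (what is proved, stated in full; the proofs are below) =====
def Claim_equal_extract_tickers_from_topic_py : Prop := ∀ (topic : String), Dom_extract_tickers_from_topic_py topic → Spec_extract_tickers_from_topic_py topic (extract_tickers_from_topic_py topic)

-- ===== LEMMAS AND PROOFS =====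

-- the inner (per-position) fold step, abstracted
def pvInner (t : List Char) (i : Nat) (b : Nat) : Nat :=
  pvKwCat.foldl (fun best kc =>
    if kc.2 < best ∧ PySem.Chars.startswith (t.drop i) kc.1 then kc.2 else best) b

def pvBest (t : List Char) : Nat :=
  (List.range t.length).foldl (fun best i => pvInner t i best) 4

lemma alt_eq (topic : String) :
    extract_tickers_from_topic_py_alt topic
      = ["^VIX"] ++ pvCatTickers.getD (pvBest (PySem.Str.lower topic).toList) [] := rfl

-- generic fold facts
lemma foldl_step_le (t : List Char) (i : Nat) :
    ∀ (l : List (List Char × Nat)) (b : Nat),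
      l.foldl (fun best kc =>
        if kc.2 < best ∧ PySem.Chars.startswith (t.drop i) kc.1 then kc.2 else best) b ≤ b := by
  intro l
  induction l with
  | nil => intro b; simp
  | cons kc rest ih =>
    intro b
    simp only [List.foldl_cons]
    split_ifs with h
    · exact le_trans (ih kc.2) (le_of_lt h.1)
    · exact ih b

lemma foldl_step_le_of_mem (t : List Char) (i : Nat) :
    ∀ (l : List (List Char × Nat)) (b : Nat) (kc : List Char × Nat), kc ∈ l →
      PySem.Chars.startswith (t.drop i) kc.1 = true →
      l.foldl (fun best kc =>
        if kc.2 < best ∧ PySem.Chars.startswith (t.drop i) kc.1 then kc.2 else best) b ≤ kc.2 := by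
  intro l
  induction l with
  | nil => intro b kc h; simp at h
  | cons kc0 rest ih =>
    intro b kc hmem hsw
    simp only [List.foldl_cons]
    rcases List.mem_cons.mp hmem with heq | hmem'
    · subst heq
      split_ifs with h
      · exact foldl_step_le t i rest kc.2
      · have : b ≤ kc.2 := by
          by_contra hb
          exact h ⟨Nat.lt_of_not_le (fun hh => hb hh), hsw⟩
        exact le_trans (foldl_step_le t i rest b) this
    · split_ifs with h
      · exact ih _ _ hmem' hsw
      · exact ih _ _ hmem' hsw

lemma foldl_step_cases (t : List Char) (i : Nat) :
    ∀ (l : List (List Char × Nat)) (b : Nat),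
      (l.foldl (fun best kc =>
        if kc.2 < best ∧ PySem.Chars.startswith (t.drop i) kc.1 then kc.2 else best) b = b)
      ∨ ∃ kc ∈ l, PySem.Chars.startswith (t.drop i) kc.1 = true ∧
        l.foldl (fun best kc =>
          if kc.2 < best ∧ PySem.Chars.startswith (t.drop i) kc.1 then kc.2 else best) b = kc.2 := by
  intro l
  induction l with
  | nil => intro b; left; simp
  | cons kc0 rest ih =>
    intro b
    simp only [List.foldl_cons]
    split_ifs with h
    · rcases ih kc0.2 with heq | ⟨kc, hm, hs, he⟩
      · right; exact ⟨kc0, List.mem_cons_self .., h.2, heq⟩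
      · right; exact ⟨kc, List.mem_cons_of_mem _ hm, hs, he⟩
    · rcases ih b with heq | ⟨kc, hm, hs, he⟩
      · left; exact heq
      · right; exact ⟨kc, List.mem_cons_of_mem _ hm, hs, he⟩

-- outer fold facts (over an arbitrary list of positions, arbitrary start)
lemma outer_le (t : List Char) :
    ∀ (l : List Nat) (b : Nat), l.foldl (fun best i => pvInner t i best) b ≤ b := by
  intro l
  induction l with
  | nil => intro b; simp
  | cons i rest ih =>
    intro b
    simp only [List.foldl_cons]
    exact le_trans (ih (pvInner t i b)) (foldl_step_le t i pvKwCat b)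

lemma outer_cases (t : List Char) :
    ∀ (l : List Nat) (b : Nat),
      (l.foldl (fun best i => pvInner t i best) b = b)
      ∨ ∃ i ∈ l, ∃ kc ∈ pvKwCat, PySem.Chars.startswith (t.drop i) kc.1 = true ∧
          l.foldl (fun best i => pvInner t i best) b = kc.2 := by
  intro l
  induction l with
  | nil => intro b; left; simp
  | cons i rest ih =>
    intro b
    simp only [List.foldl_cons]
    rcases ih (pvInner t i b) with heq | ⟨j, hj, kc, hm, hs, he⟩
    · rcases foldl_step_cases t i pvKwCat b with h0 | ⟨kc, hm, hs, he⟩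
      · left; rw [heq]; exact h0
      · right; exact ⟨i, List.mem_cons_self .., kc, hm, hs, by rw [heq]; exact he⟩
    · right; exact ⟨j, List.mem_cons_of_mem _ hj, kc, hm, hs, he⟩

lemma outer_le_of_match (t : List Char) :
    ∀ (l : List Nat) (b : Nat) (i : Nat), i ∈ l →
      ∀ (kc : List Char × Nat), kc ∈ pvKwCat → PySem.Chars.startswith (t.drop i) kc.1 = true →
      l.foldl (fun best i => pvInner t i best) b ≤ kc.2 := by
  intro l
  induction l with
  | nil => intro b i h; simp at h
  | cons j rest ih =>
    intro b i hi kc hm hs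
    simp only [List.foldl_cons]
    rcases List.mem_cons.mp hi with heq | hmem
    · subst heq
      exact le_trans (outer_le t rest (pvInner t i b)) (foldl_step_le_of_mem t i pvKwCat b kc hm hs)
    · exact ih _ i hmem kc hm hs

-- pvBest specializations
lemma pvBest_le (t : List Char) : pvBest t ≤ 4 := outer_le t _ 4

lemma pvBest_cases (t : List Char) :
    pvBest t = 4 ∨ ∃ i < t.length, ∃ kc ∈ pvKwCat,
      PySem.Chars.startswith (t.drop i) kc.1 = true ∧ pvBest t = kc.2 := by
  rcases outer_cases t (List.range t.length) 4 with h | ⟨i, hi, kc, hm, hs, he⟩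
  · left; exact h
  · right; exact ⟨i, List.mem_range.mp hi, kc, hm, hs, he⟩

lemma pvBest_le_of_match (t : List Char) (i : Nat) (hi : i < t.length)
    (kc : List Char × Nat) (hm : kc ∈ pvKwCat)
    (hs : PySem.Chars.startswith (t.drop i) kc.1 = true) : pvBest t ≤ kc.2 :=
  outer_le_of_match t (List.range t.length) 4 i (List.mem_range.mpr hi) kc hm hs

-- substring bridge: A's `word in topic_lower` vs B's bounded positional prefix test
lemma isIn_iff_pos (w s : String) (hw : w.toList ≠ []) :
    PySem.Str.isIn w s = true ↔
      ∃ i < s.toList.length, PySem.Chars.startswith (s.toList.drop i) w.toList = true := by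
  rw [PySem.Str.isIn_iff_infix]
  constructor
  · intro h
    have h2 : ∃ j, w.toList <+: s.toList.drop j := by
      rw [PySem.Chars.exists_prefix_drop_iff_isIn, PySem.Chars.isIn_iff_infix]; exact h
    obtain ⟨j, hj⟩ := h2
    have hjlt : j < s.toList.length := by
      by_contra hge
      rw [List.drop_eq_nil_of_le (Nat.le_of_not_lt hge)] at hj
      exact hw (List.prefix_nil.mp hj)
    exact ⟨j, hjlt, (PySem.Chars.startswith_iff _ _).mpr hj⟩
  · intro ⟨i, hi, hs⟩
    have h2 : ∃ j, w.toList <+: s.toList.drop j := ⟨i, (PySem.Chars.startswith_iff _ _).mp hs⟩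
    rw [PySem.Chars.exists_prefix_drop_iff_isIn, PySem.Chars.isIn_iff_infix] at h2
    exact h2

-- A's four word lists, by category index
def pvWords : Nat → List String
  | 0 => ["crypto", "bitcoin", "btc", "ethereum", "eth", "blockchain"]
  | 1 => ["bond", "treasury", "fixed income", "rates"]
  | 2 => ["tech", "technology", "ai", "software"]
  | 3 => ["energy", "oil", "commodit"]
  | _ => []

lemma any_of_match (s : String) (i : Nat) (hi : i < s.toList.length)
    (kc : List Char × Nat) (hm : kc ∈ pvKwCat)
    (hs : PySem.Chars.startswith (s.toList.drop i) kc.1 = true) :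
    (pvWords kc.2).any (fun w => PySem.Str.isIn w s) = true := by
  fin_cases hm <;>
    exact List.any_eq_true.mpr ⟨_, by decide, (isIn_iff_pos _ _ (by decide)).mpr ⟨i, hi, hs⟩⟩

lemma best_le_of_isIn (s w : String) (c : Nat) (hw : w.toList ≠ [])
    (hkc : (w.toList, c) ∈ pvKwCat) (hIn : PySem.Str.isIn w s = true) :
    pvBest s.toList ≤ c := by
  obtain ⟨i, hi, hsw⟩ := (isIn_iff_pos w s hw).mp hIn
  exact pvBest_le_of_match _ i hi (w.toList, c) hkc hsw

lemma best_le_of_any (s : String) (c : Nat) (hc : c < 4)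
    (h : (pvWords c).any (fun w => PySem.Str.isIn w s) = true) : pvBest s.toList ≤ c := by
  obtain ⟨w, hwmem, hIn⟩ := List.any_eq_true.mp h
  interval_cases c <;> fin_cases hwmem <;>
    exact best_le_of_isIn s _ _ (by decide) (by decide) hIn

lemma best_ne_of_not_any (s : String) (c : Nat) (hc : c ≠ 4)
    (h : ¬ ((pvWords c).any (fun w => PySem.Str.isIn w s) = true)) : pvBest s.toList ≠ c := by
  intro hb
  rcases pvBest_cases s.toList with h4 | ⟨i, hi, kc, hm, hsw, he⟩
  · exact hc (hb ▸ h4)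
  · have hany := any_of_match s i hi kc hm hsw
    rw [he] at hb
    rw [hb] at hany
    exact h hany

-- ===== VERDICT (by name: the statement is the Claim_ definition above) =====
theorem extract_tickers_from_topic_py_spec : Claim_equal_extract_tickers_from_topic_py := by
  intro topic _
  unfold Spec_extract_tickers_from_topic_py
  rw [alt_eq]
  unfold extract_tickers_from_topic_py
  set s := PySem.Str.lower topic with hsdef
  have hle4 := pvBest_le s.toList
  dsimp only
  split_ifs with h0 h1 h2 h3
  · have hb : pvBest s.toList = 0 :=
      Nat.le_zero.mp (best_le_of_any s 0 (by omega) (by simpa [pvWords] using h0))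
    rw [hb]; rfl
  · have hne0 := best_ne_of_not_any s 0 (by omega) (by simpa [pvWords] using h0)
    have hle1 := best_le_of_any s 1 (by omega) (by simpa [pvWords] using h1)
    have hb : pvBest s.toList = 1 := by omega
    rw [hb]; rfl
  · have hne0 := best_ne_of_not_any s 0 (by omega) (by simpa [pvWords] using h0)
    have hne1 := best_ne_of_not_any s 1 (by omega) (by simpa [pvWords] using h1)
    have hle2 := best_le_of_any s 2 (by omega) (by simpa [pvWords] using h2)
    have hb : pvBest s.toList = 2 := by omega
    rw [hb]; rfl
  · have hne0 := best_ne_of_not_any s 0 (by omega) (by simpa [pvWords] using h0)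
    have hne1 := best_ne_of_not_any s 1 (by omega) (by simpa [pvWords] using h1)
    have hne2 := best_ne_of_not_any s 2 (by omega) (by simpa [pvWords] using h2)
    have hle3 := best_le_of_any s 3 (by omega) (by simpa [pvWords] using h3)
    have hb : pvBest s.toList = 3 := by omega
    rw [hb]; rfl
  · have hne0 := best_ne_of_not_any s 0 (by omega) (by simpa [pvWords] using h0)
    have hne1 := best_ne_of_not_any s 1 (by omega) (by simpa [pvWords] using h1)
    have hne2 := best_ne_of_not_any s 2 (by omega) (by simpa [pvWords] using h2)
    have hne3 := best_ne_of_not_any s 3 (by omega) (by simpa [pvWords] using h3)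
    have hb : pvBest s.toList = 4 := by omega
    rw [hb]; rfl
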